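-- pv_equiv track=rewrite | github.com/exucutional/bioinformatics | problem20/solve.py | linear_score
-- ===== SOURCE A (Python) =====
-- def linearspectrum(peptide):
--     prefixes = [0]
--     for i in range(len(peptide)):
--         prefixes.append(prefixes[i]+peptide[i])
--
--     spectrum = [0]
--     for i in range(len(peptide)):
--         for j in range(i+1, len(peptide)+1):
--             spectrum.append(prefixes[j]-prefixes[i])
--
--     spectrumDict = dict()
--     for s in spectrum:
--         spectrumDict[s] = spectrumDict.get(s, 0) + 1
--
--     return spectrumDict
--
-- def linear_score(peptide, spectrum):
--     if len(peptide) == 0: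
--         return 0
--
--     peptide_list = [int(p) for p in peptide.split('-')]
--     linear_spectrum = linearspectrum(peptide_list)
--     score = 0
--     for key, value in linear_spectrum.items():
--         v = spectrum.get(key, 0)
--         if v >= value:
--             score += value
--         else:
--             score += v
--     return score
-- ===== SOURCE B (Python) =====
-- def linear_score(peptide, spectrum):
--     if len(peptide) == 0:
--         return 0
--
--     parts = [int(p) for p in peptide.split('-')]
--     n = len(parts)
--
--     # greedy multiset matching: consume one unit of the experimental spectrum
--     # for each subpeptide mass as it is generated; no counter dict is built
--     remaining = dict(spectrum)
--     score = 0
--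
--     # the empty subpeptide (mass 0)
--     if remaining.get(0, 0) > 0:
--         score += 1
--         remaining[0] = remaining[0] - 1
--
--     for i in range(n):
--         total = 0
--         for j in range(i, n):
--             total += parts[j]
--             if remaining.get(total, 0) > 0:
--                 score += 1
--                 remaining[total] = remaining[total] - 1
--     return score
-- ===== Notes on version B (the rewrite author's own statement) =====
-- stated objective: alternative
-- what changed: B never builds A's linear-spectrum counter dict (or prefix array): it fuses generation with matching, computing each subpeptide mass with a running sum and greedily consuming one unit of a mutable copy of the experimental spectrum per generated mass.
-- intended difference: On inputs whose experimental spectrum assigns a NEGATIVE count to some mass of the peptide's linear spectrum, A adds that negative count to the score (e.g. returns -1 on ('1', {1: -1})); B's greedy matcher never consumes a non-positive count and returns 0 there, the intended multiset-overlap size, since negative multiplicities cannot match anything. — e.g. on linear_score("1", [(1, -1)]): A returns -1, B returns 0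
import Mathlib
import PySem

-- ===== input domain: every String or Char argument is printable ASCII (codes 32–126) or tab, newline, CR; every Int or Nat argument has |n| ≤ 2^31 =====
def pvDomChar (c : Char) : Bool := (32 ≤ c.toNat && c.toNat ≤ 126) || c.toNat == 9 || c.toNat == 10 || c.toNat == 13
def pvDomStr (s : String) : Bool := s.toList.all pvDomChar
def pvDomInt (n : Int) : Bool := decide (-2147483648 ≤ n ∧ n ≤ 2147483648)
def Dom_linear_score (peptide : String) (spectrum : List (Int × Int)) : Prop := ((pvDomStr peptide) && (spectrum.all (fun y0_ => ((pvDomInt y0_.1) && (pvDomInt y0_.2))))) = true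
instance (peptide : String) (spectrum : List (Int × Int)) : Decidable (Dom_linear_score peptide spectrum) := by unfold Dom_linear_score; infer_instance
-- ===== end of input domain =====

-- B drops A's linear-spectrum counter dict and prefix array: it fuses generation with
-- matching, greedily consuming one unit of a mutable copy of the experimental spectrum per
-- generated subpeptide mass (objective: alternative; B is intendedly different on spectra
-- with negative counts at linear-spectrum masses — see D_linear_score).

-- ===== PORT A =====
def linearspectrum (peptide : List Int) : PySem.Dict Int Int :=
  let n : Int := PySem.List.len peptide
  let prefixes : List Int := (PySem.List.pyRange 0 n 1).foldl
    (fun pfx i => pfx ++ [PySem.List.pyGetD pfx i 0 + PySem.List.pyGetD peptide i 0]) [0]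
  let spectrum : List Int := (PySem.List.pyRange 0 n 1).foldl
    (fun acc i => (PySem.List.pyRange (i + 1) (n + 1) 1).foldl
      (fun acc2 j => acc2 ++ [PySem.List.pyGetD prefixes j 0 - PySem.List.pyGetD prefixes i 0]) acc) [0]
  spectrum.foldl (fun d s => d.insert s (d.getD s 0 + 1)) PySem.Dict.empty

def linear_score (peptide : String) (spectrum : List (Int × Int)) : Int :=
  if PySem.Str.len peptide == 0 then 0
  else
    match ((PySem.Str.split? peptide "-").getD []).mapM PySem.Int.ofStr? with
    | none => 0   -- int() raises ValueError in Python: excluded by Pre_linear_score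
    | some peptide_list =>
      let linear_spectrum := linearspectrum peptide_list
      linear_spectrum.items.foldl
        (fun score kv =>
          let v := (PySem.Dict.mk spectrum).getD kv.1 0
          if v ≥ kv.2 then score + kv.2 else score + v) 0

-- ===== PORT B =====
def linear_score_alt (peptide : String) (spectrum : List (Int × Int)) : Int :=
  if PySem.Str.len peptide == 0 then 0
  else
    match ((PySem.Str.split? peptide "-").getD []).mapM PySem.Int.ofStr? with
    | none => 0   -- int() raises ValueError in Python: excluded by Pre_linear_score
    | some parts =>
      let n : Int := PySem.List.len parts
      let remaining := PySem.Dict.mk spectrum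
      -- the empty subpeptide (mass 0)
      let st0 : Int × PySem.Dict Int Int :=
        if remaining.getD 0 0 > 0 then (1, remaining.insert 0 (remaining.getD 0 0 - 1))
        else (0, remaining)
      let st := (PySem.List.pyRange 0 n 1).foldl
        (fun st i =>
          ((PySem.List.pyRange i n 1).foldl
            (fun (q : Int × Int × PySem.Dict Int Int) j =>
              let total := q.1 + PySem.List.pyGetD parts j 0
              let v := q.2.2.getD total 0
              if v > 0 then (total, q.2.1 + 1, q.2.2.insert total (v - 1))
              else (total, q.2.1, q.2.2))
            (0, st)).2) st0
      st.1

-- ===== PRECONDITION & SPEC =====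
-- Pre_ excludes exactly the inputs on which A raises ValueError: a nonempty peptide
-- string with a '-'-separated piece that is not a valid int literal.
def Pre_linear_score (peptide : String) (spectrum : List (Int × Int)) : Prop :=
  peptide = "" ∨ ∀ p ∈ (PySem.Str.split? peptide "-").getD [], (PySem.Int.ofStr? p).isSome = true
instance (peptide : String) (spectrum : List (Int × Int)) : Decidable (Pre_linear_score peptide spectrum) := by unfold Pre_linear_score; infer_instance

def pvWitness_linear_score : String × (List (Int × Int)) := ("31-15-7", [(31, 1), (46, 2), (0, 1)])

-- On inputs whose experimental spectrum assigns a NEGATIVE count to some mass of the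
-- peptide's linear spectrum (a difference of two prefix sums of the parsed peptide),
-- A adds that negative count to the score; B's greedy matcher never consumes a
-- non-positive count and returns the intended multiset-overlap size there.
def D_linear_score (peptide : String) (spectrum : List (Int × Int)) : Prop :=
  let parts := (((PySem.Str.split? peptide "-").getD []).mapM PySem.Int.ofStr?).getD []
  PySem.Str.len peptide ≠ 0 ∧
  ∃ j ∈ List.range (parts.length + 1), ∃ i ∈ List.range (j + 1),
    (PySem.Dict.mk spectrum).getD ((parts.take j).sum - (parts.take i).sum) 0 < 0
instance (peptide : String) (spectrum : List (Int × Int)) : Decidable (D_linear_score peptide spectrum) := by unfold D_linear_score; infer_instance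

def Spec_linear_score (peptide : String) (spectrum : List (Int × Int)) (out : Int) : Prop := ¬ D_linear_score peptide spectrum → out = linear_score_alt peptide spectrum
instance (peptide : String) (spectrum : List (Int × Int)) (out : Int) : Decidable (Spec_linear_score peptide spectrum out) := by unfold Spec_linear_score; infer_instance

def pvDiffWitness_linear_score : String × (List (Int × Int)) := ("1", [(1, -1)])
def pvDiffWitnessOut_linear_score : Int × Int := (-1, 0)

-- ===== CLAIM (what is proved, stated in full; the proofs are below) =====
def Claim_unchanged_linear_score : Prop := ∀ (peptide : String) (spectrum : List (Int × Int)), Dom_linear_score peptide spectrum → Pre_linear_score peptide spectrum → Spec_linear_score peptide spectrum (linear_score peptide spectrum)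
def Claim_changed_linear_score : Prop := Dom_linear_score (pvDiffWitness_linear_score.1) (pvDiffWitness_linear_score.2) ∧ Pre_linear_score (pvDiffWitness_linear_score.1) (pvDiffWitness_linear_score.2) ∧ D_linear_score (pvDiffWitness_linear_score.1) (pvDiffWitness_linear_score.2) ∧ linear_score (pvDiffWitness_linear_score.1) (pvDiffWitness_linear_score.2) = pvDiffWitnessOut_linear_score.1 ∧ linear_score_alt (pvDiffWitness_linear_score.1) (pvDiffWitness_linear_score.2) = pvDiffWitnessOut_linear_score.2 ∧ pvDiffWitnessOut_linear_score.1 ≠ pvDiffWitnessOut_linear_score.2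
def Claim_exact_linear_score : Prop := ∀ (peptide : String) (spectrum : List (Int × Int)), Dom_linear_score peptide spectrum → Pre_linear_score peptide spectrum → D_linear_score peptide spectrum → linear_score peptide spectrum ≠ linear_score_alt peptide spectrum

-- ===== LEMMAS AND PROOFS =====

-- canonical list of all nonempty-subpeptide masses, grouped by start index
def pvSub (parts : List Int) : List Int :=
  (List.range parts.length).flatMap
    (fun i => (List.range (parts.length - i)).map (fun t => ((parts.drop i).take (t + 1)).sum))

-- the masses 0 :: pvSub parts are exactly the differences of two ordered prefix sums
lemma pv_mem_zero_pvSub (parts : List Int) (k : Int) :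
    k ∈ 0 :: pvSub parts ↔ ∃ j ∈ List.range (parts.length + 1), ∃ i ∈ List.range (j + 1),
      k = (parts.take j).sum - (parts.take i).sum := by
  constructor
  · intro hk
    rcases List.mem_cons.mp hk with rfl | hk'
    · exact ⟨0, List.mem_range.mpr (by omega), 0, List.mem_range.mpr (by omega), by simp⟩
    · rcases List.mem_flatMap.mp hk' with ⟨i, hi, hmem⟩
      rcases List.mem_map.mp hmem with ⟨t, ht, rfl⟩
      rw [List.mem_range] at hi ht
      refine ⟨i + (t + 1), List.mem_range.mpr (by omega), i, List.mem_range.mpr (by omega), ?_⟩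
      have h : parts.take (i + (t + 1)) = parts.take i ++ (parts.drop i).take (t + 1) := by
        rw [List.take_add]
      rw [h, List.sum_append]
      ring
  · rintro ⟨j, hj, i, hi, rfl⟩
    rw [List.mem_range] at hj hi
    by_cases hij : i = j
    · subst hij
      simp
    · have hlt : i < j := by omega
      refine List.mem_cons_of_mem 0 (List.mem_flatMap.mpr ⟨i, List.mem_range.mpr (by omega),
        List.mem_map.mpr ⟨j - i - 1, List.mem_range.mpr (by omega), ?_⟩⟩)
      have hji : j - i - 1 + 1 = j - i := by omega
      have h : parts.take j = parts.take i ++ (parts.drop i).take (j - i) := by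
        conv_lhs => rw [show j = i + (j - i) by omega]
        rw [List.take_add]
      rw [hji, h, List.sum_append]
      ring

-- a failing elementwise parse has a failing element
lemma pv_mapM_none (f : String → Option Int) (l : List String) (h : l.mapM f = none) :
    ∃ p ∈ l, f p = none := by
  induction l with
  | nil => simp at h
  | cons a l ih =>
    cases ha : f a with
    | none => exact ⟨a, List.mem_cons_self, ha⟩
    | some b =>
      cases hl : l.mapM f with
      | none =>
        rcases ih hl with ⟨p, hp, hnp⟩
        exact ⟨p, List.mem_cons_of_mem a hp, hnp⟩
      | some bs =>
        rw [List.mapM_cons, ha, hl] at h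
        simp at h

-- D_ restated through membership in 0 :: pvSub parts, once the peptide is parsed
lemma pv_D_iff (peptide : String) (spectrum : List (Int × Int)) (parts : List Int)
    (hp : ((PySem.Str.split? peptide "-").getD []).mapM PySem.Int.ofStr? = some parts) :
    D_linear_score peptide spectrum ↔
      (PySem.Str.len peptide ≠ 0 ∧
       ∃ k ∈ 0 :: pvSub parts, (PySem.Dict.mk spectrum).getD k 0 < 0) := by
  unfold D_linear_score
  rw [hp]
  simp only [Option.getD_some]
  constructor
  · rintro ⟨h1, j, hj, i, hi, hlt⟩
    exact ⟨h1, _, (pv_mem_zero_pvSub parts _).mpr ⟨j, hj, i, hi, rfl⟩, hlt⟩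
  · rintro ⟨h1, k, hk, hlt⟩
    rcases (pv_mem_zero_pvSub parts k).mp hk with ⟨j, hj, i, hi, rfl⟩
    exact ⟨h1, j, hj, i, hi, hlt⟩

-- Σ over the distinct keys of L of w(key, multiplicity of key in L)
def pvW (w : Int → Int → Int) (L : List Int) : Int :=
  ((PySem.List.dedup L).map (fun k => w k ((L.count k : Int)))).sum

-- one greedy matching step of B: consume a unit of d at mass m if available
def pvStep (st : Int × PySem.Dict Int Int) (m : Int) : Int × PySem.Dict Int Int :=
  let v := st.2.getD m 0
  if v > 0 then (st.1 + 1, st.2.insert m (v - 1)) else st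

-- B's greedy matching as a recursion with a functional spectrum state
def pvMatch (g : Int → Int) : List Int → Int
  | [] => 0
  | m :: t =>
      if 0 < g m then 1 + pvMatch (fun k => if k = m then g m - 1 else g k) t
      else pvMatch g t

-- A's prefix array is the list of prefix sums
lemma pv_prefix_fold (parts : List Int) (m : Nat) (hm : m ≤ parts.length) :
    (PySem.List.pyRange 0 (m : Int) 1).foldl
      (fun pfx i => pfx ++ [PySem.List.pyGetD pfx i 0 + PySem.List.pyGetD parts i 0]) [0]
    = (List.range (m + 1)).map (fun k => ((parts.take k).sum : Int)) := by
  induction m with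
  | zero => simp
  | succ m ih =>
    have hm' : m ≤ parts.length := Nat.le_of_succ_le hm
    have hcast : ((m + 1 : Nat) : Int) = (m : Int) + 1 := by push_cast; ring
    rw [hcast, PySem.List.pyRange_one_succ_right (by positivity), List.foldl_append,
      ih hm']
    simp only [List.foldl_cons, List.foldl_nil]
    rw [List.range_succ (n := m + 1), List.map_append]
    congr 1
    simp only [PySem.List.pyGetD_natCast, List.map_cons, List.map_nil]
    congr 1
    have h1 : (List.map (fun k => ((parts.take k).sum : Int)) (List.range (m + 1))).getD m 0
        = (parts.take m).sum := PySem.List.getD_map_range _ _ _ _ (by omega)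
    have h2 : parts.getD m 0 = parts[m]'(by omega) := List.getD_eq_getElem parts 0 (by omega)
    rw [h1, h2, List.sum_take_succ parts m (by omega)]

-- A's generated spectrum list is 0 :: pvSub parts
lemma pv_genA (parts : List Int) :
    (PySem.List.pyRange 0 (parts.length : Int) 1).foldl
      (fun acc i => (PySem.List.pyRange (i + 1) ((parts.length : Int) + 1) 1).foldl
        (fun acc2 j => acc2 ++
          [PySem.List.pyGetD ((List.range (parts.length + 1)).map (fun k => ((parts.take k).sum : Int))) j 0
           - PySem.List.pyGetD ((List.range (parts.length + 1)).map (fun k => ((parts.take k).sum : Int))) i 0]) acc) [0]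
    = 0 :: pvSub parts := by
  set n := parts.length with hn
  set P := (List.range (n + 1)).map (fun k => ((parts.take k).sum : Int)) with hP
  rw [PySem.List.foldl_congr_mem _ _
    (fun acc i => acc ++ (PySem.List.pyRange (i + 1) ((n : Int) + 1) 1).map
      (fun j => PySem.List.pyGetD P j 0 - PySem.List.pyGetD P i 0)) [0]
    (fun acc i _ => PySem.List.foldl_append_singleton_eq_map _ _ _)]
  rw [PySem.List.foldl_append_eq_flatMap]
  rw [PySem.List.pyRange_zero_natCast]
  simp only [List.singleton_append, pvSub]
  congr 1
  rw [List.flatMap_def, List.flatMap_def, List.map_map]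
  congr 1
  refine List.map_congr_left ?_
  intro i hi
  rw [List.mem_range] at hi
  simp only [Function.comp]
  have e1 : ((i : Int) + 1) = ((i + 1 : Nat) : Int) := by push_cast; ring
  have e2 : ((n : Int) + 1) = ((n + 1 : Nat) : Int) := by push_cast; ring
  rw [e1, e2, PySem.List.pyRange_one, List.map_map]
  have e3 : (((n + 1 : Nat) : Int) - ((i + 1 : Nat) : Int)).toNat = n - i := by omega
  rw [e3]
  refine List.map_congr_left ?_
  intro k hk
  rw [List.mem_range] at hk
  simp only [Function.comp]
  have e4 : ((i + 1 : Nat) : Int) + (k : Int) = ((i + 1 + k : Nat) : Int) := by push_cast; ring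
  rw [e4, PySem.List.pyGetD_natCast, PySem.List.pyGetD_natCast, hP]
  have g1 : ((List.range (n + 1)).map (fun k => ((parts.take k).sum : Int))).getD (i + 1 + k) 0
      = (parts.take (i + 1 + k)).sum := PySem.List.getD_map_range _ _ _ _ (by omega)
  have g2 : ((List.range (n + 1)).map (fun k => ((parts.take k).sum : Int))).getD i 0
      = (parts.take i).sum := PySem.List.getD_map_range _ _ _ _ (by omega)
  rw [g1, g2]
  have e5 : i + 1 + k = i + (k + 1) := by omega
  rw [e5, List.take_add, List.sum_append]
  ring

-- A's scoring loop over the counter's items computes pvW (min · (g ·))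
lemma pv_scoreA (g : Int → Int) (L : List Int) :
    (PySem.Dict.counter L).items.foldl
      (fun score kv => let v := g kv.1; if v ≥ kv.2 then score + kv.2 else score + v) 0
    = pvW (fun k c => min c (g k)) L := by
  rw [PySem.Dict.items_counter, List.foldl_map]
  rw [PySem.List.foldl_congr_mem _ _ (fun score k => score + min ((L.count k : Int)) (g k)) 0 ?_]
  · rw [PySem.List.foldl_add]
    simp [pvW, PySem.List.dedup_eq_ofList]
  · intro acc k _
    simp only
    split_ifs with h
    · rw [min_eq_left h]
    · rw [min_eq_right (le_of_not_ge h)]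

-- A's post-parse body computes pvW over 0 :: pvSub parts
lemma pv_bodyA (parts : List Int) (spectrum : List (Int × Int)) :
    (linearspectrum parts).items.foldl
      (fun score kv =>
        let v := (PySem.Dict.mk spectrum).getD kv.1 0
        if v ≥ kv.2 then score + kv.2 else score + v) 0
    = pvW (fun k c => min c ((PySem.Dict.mk spectrum).getD k 0)) (0 :: pvSub parts) := by
  have hls : linearspectrum parts = PySem.Dict.counter (0 :: pvSub parts) := by
    simp only [linearspectrum, PySem.List.len_eq]
    rw [pv_prefix_fold parts parts.length le_rfl, pv_genA parts,
      PySem.Dict.foldl_insert_getD_add_one_eq_counter]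
  rw [hls]
  exact pv_scoreA (fun k => (PySem.Dict.mk spectrum).getD k 0) (0 :: pvSub parts)

-- peel one distinct key off pvW
lemma pv_extractW (w : Int → Int → Int) (u : List Int) (p : Int) (hp : p ∈ u) :
    pvW w u = w p ((u.count p : Int)) + pvW w (u.filter (fun x => !(x == p))) := by
  have hmemf : ∀ x : Int, x ∈ u.filter (fun x => !(x == p)) ↔ x ∈ u ∧ x ≠ p := by
    intro x; simp [List.mem_filter]
  have hd : (PySem.List.dedup u).Perm (p :: PySem.List.dedup (u.filter (fun x => !(x == p)))) := by
    rw [List.perm_ext_iff_of_nodup (PySem.List.nodup_dedup u) ?_]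
    · intro a
      simp only [PySem.List.mem_dedup, List.mem_cons, hmemf]
      constructor
      · intro ha
        by_cases hap : a = p
        · exact Or.inl hap
        · exact Or.inr ⟨ha, hap⟩
      · rintro (rfl | ⟨ha, _⟩)
        · exact hp
        · exact ha
    · refine List.Nodup.cons ?_ (PySem.List.nodup_dedup _)
      rw [PySem.List.mem_dedup, hmemf]
      simp
  unfold pvW
  rw [((hd.map _).sum_eq : _)]
  simp only [List.map_cons, List.sum_cons]
  congr 1
  apply congrArg
  refine List.map_congr_left ?_
  intro k hk
  rw [PySem.List.mem_dedup, hmemf] at hk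
  congr 1
  rw [List.count_filter]
  simp [hk.2]

-- pvW depends on w only at the keys of the list
lemma pvW_congr (w w' : Int → Int → Int) (L : List Int)
    (h : ∀ k ∈ L, w k ((L.count k : Int)) = w' k ((L.count k : Int))) :
    pvW w L = pvW w' L := by
  unfold pvW
  apply congrArg
  refine List.map_congr_left ?_
  intro k hk
  exact h k ((PySem.List.mem_dedup _ _).mp hk)

-- peel an arbitrary key (possibly absent) off pvW, for weights with w k 0 = 0
lemma pvW_of_filter (w : Int → Int → Int) (hw0 : ∀ k, w k 0 = 0) (t : List Int) (m : Int) :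
    pvW w t = w m ((t.count m : Int)) + pvW w (t.filter (fun x => !(x == m))) := by
  by_cases hm : m ∈ t
  · exact pv_extractW w t m hm
  · have hc : t.count m = 0 := List.count_eq_zero.mpr hm
    have hf : t.filter (fun x => !(x == m)) = t := by
      rw [List.filter_eq_self]
      intro a ha
      simp only [Bool.not_eq_eq_eq_not, Bool.not_true, beq_eq_false_iff_ne, ne_eq]
      intro he; exact hm (he ▸ ha)
    rw [hc, hf]
    simp [hw0]

-- B's fold of pvStep equals pvMatch with the dict read off as a function
lemma pv_fold_step (L : List Int) : ∀ (s : Int) (d : PySem.Dict Int Int),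
    (L.foldl pvStep (s, d)).1 = s + pvMatch (fun k => d.getD k 0) L := by
  induction L with
  | nil => intro s d; simp [pvMatch]
  | cons m t ih =>
    intro s d
    rw [List.foldl_cons]
    by_cases h : 0 < d.getD m 0
    · have e : pvStep (s, d) m = (s + 1, d.insert m (d.getD m 0 - 1)) := by
        simp [pvStep, h]
      rw [e, ih]
      have hg : (fun k => (d.insert m (d.getD m 0 - 1)).getD k 0)
          = (fun k => if k = m then d.getD m 0 - 1 else d.getD k 0) := by
        funext k
        rw [PySem.Dict.getD_insert]
      rw [hg, pvMatch, if_pos h]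
      ring
    · have e : pvStep (s, d) m = (s, d) := by
        simp [pvStep, h]
      rw [e, ih, pvMatch, if_neg h]

-- greedy matching computes the clamped multiset-overlap size
lemma pv_match_eq (L : List Int) : ∀ (g : Int → Int),
    pvMatch g L = pvW (fun k c => min c (max (g k) 0)) L := by
  induction L with
  | nil => intro g; simp [pvMatch, pvW]
  | cons m t ih =>
    intro g
    have hw0 : ∀ (g' : Int → Int) (k : Int), min (0 : Int) (max (g' k) 0) = 0 := by
      intro g' k; omega
    have hsplit := pv_extractW (fun k c => min c (max (g k) 0)) (m :: t) m List.mem_cons_self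
    have hfc : (m :: t).filter (fun x => !(x == m)) = t.filter (fun x => !(x == m)) := by
      simp
    rw [hfc, List.count_cons_self] at hsplit
    by_cases h : 0 < g m
    · rw [pvMatch, if_pos h, ih]
      set g1 : Int → Int := fun k => if k = m then g m - 1 else g k with hg1
      have hsplit1 := pvW_of_filter (fun k c => min c (max (g1 k) 0)) (hw0 g1) t m
      have hcongr : pvW (fun k c => min c (max (g1 k) 0)) (t.filter (fun x => !(x == m)))
          = pvW (fun k c => min c (max (g k) 0)) (t.filter (fun x => !(x == m))) := by
        apply pvW_congr
        intro k hk
        have : k ≠ m := by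
          rcases List.mem_filter.mp hk with ⟨_, hne⟩
          simpa using hne
        simp [hg1, this]
      rw [hsplit1, hcongr, hsplit]
      have hcnt : (0 : Int) ≤ (t.count m : Int) := by positivity
      have hg1m : g1 m = g m - 1 := by simp [hg1]
      rw [hg1m]
      simp only [Nat.cast_add, Nat.cast_one]
      omega
    · rw [pvMatch, if_neg h, ih]
      have hsplit0 := pvW_of_filter (fun k c => min c (max (g k) 0)) (hw0 g) t m
      rw [hsplit0, hsplit]
      have hcnt : (0 : Int) ≤ (t.count m : Int) := by positivity
      simp only [Nat.cast_add, Nat.cast_one]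
      omega

-- fold a per-block inner loop into one fold over the concatenation
lemma pv_foldl_blocks (l : List Nat) (g : Nat → List Int) :
    ∀ (st : Int × PySem.Dict Int Int),
    l.foldl (fun st i => (g i).foldl pvStep st) st = (l.flatMap g).foldl pvStep st := by
  induction l with
  | nil => intro st; simp
  | cons i l ih =>
    intro st
    rw [List.foldl_cons, List.flatMap_cons, List.foldl_append, ih]

-- B's inner running-sum loop threads pvStep over the block's prefix sums
lemma pv_inner (q : List Int) : ∀ (t0 : Int) (s0 : Int × PySem.Dict Int Int),
    q.foldl (fun (p : Int × Int × PySem.Dict Int Int) x => (p.1 + x, pvStep p.2 (p.1 + x))) (t0, s0)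
    = (t0 + q.sum,
       ((List.range q.length).map (fun t => t0 + (q.take (t + 1)).sum)).foldl pvStep s0) := by
  induction q with
  | nil => intro t0 s0; simp
  | cons x q ih =>
    intro t0 s0
    have hmap : (List.range (q.length + 1)).map (fun t => t0 + (((x :: q).take (t + 1)).sum))
        = (t0 + x) :: (List.range q.length).map (fun t => (t0 + x) + ((q.take (t + 1)).sum)) := by
      rw [List.range_succ_eq_map, List.map_cons, List.map_map]
      refine congrArg₂ _ (by simp) ?_
      refine List.map_congr_left ?_
      intro a _
      simp only [Function.comp, Nat.succ_eq_add_one, List.take_succ_cons, List.sum_cons]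
      ring
    simp only [List.foldl_cons]
    rw [ih (t0 + x) (pvStep s0 (t0 + x))]
    rw [List.length_cons, hmap, List.foldl_cons, List.sum_cons]
    refine congrArg₂ _ (by ring) rfl

-- B's nested generation-and-matching loops fold pvStep over 0 :: pvSub parts
lemma pv_bodyB (parts : List Int) (d : PySem.Dict Int Int) :
    ((PySem.List.pyRange 0 ((PySem.List.len parts) : Int) 1).foldl
      (fun st i =>
        ((PySem.List.pyRange i (PySem.List.len parts) 1).foldl
          (fun (q : Int × Int × PySem.Dict Int Int) j =>
            let total := q.1 + PySem.List.pyGetD parts j 0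
            let v := q.2.2.getD total 0
            if v > 0 then (total, q.2.1 + 1, q.2.2.insert total (v - 1))
            else (total, q.2.1, q.2.2))
          (0, st)).2)
      (if d.getD 0 0 > 0 then (1, d.insert 0 (d.getD 0 0 - 1)) else (0, d))).1
    = ((0 :: pvSub parts).foldl pvStep (0, d)).1 := by
  have hst0 : (if d.getD 0 0 > 0 then (1, d.insert 0 (d.getD 0 0 - 1)) else (0, d))
      = pvStep (0, d) 0 := by
    simp only [pvStep]
    split <;> rfl
  rw [hst0]
  rw [PySem.List.foldl_congr_mem _ _
    (fun st (i : Int) =>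
      ((List.range ((parts.drop i.toNat).length)).map
        (fun t => ((parts.drop i.toNat).take (t + 1)).sum)).foldl pvStep st)
    (pvStep (0, d) 0) ?_]
  · rw [PySem.List.len_eq, PySem.List.pyRange_zero_natCast, List.foldl_map]
    rw [PySem.List.foldl_congr_mem _ _
      (fun st (i : Nat) =>
        ((List.range (parts.length - i)).map
          (fun t => ((parts.drop i).take (t + 1)).sum)).foldl pvStep st)
      (pvStep (0, d) 0) ?_]
    · rw [pv_foldl_blocks]
      rfl
    · intro st i _
      simp [List.length_drop]
  · intro st i hi
    have h0 : (0 : Int) ≤ i := (PySem.List.mem_pyRange_one.mp hi).1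
    have hbody' : (fun (q : Int × Int × PySem.Dict Int Int) (j : Int) =>
        let total := q.1 + PySem.List.pyGetD parts j 0
        let v := q.2.2.getD total 0
        if v > 0 then (total, q.2.1 + 1, q.2.2.insert total (v - 1))
        else (total, q.2.1, q.2.2))
        = (fun (p : Int × Int × PySem.Dict Int Int) j =>
            (p.1 + PySem.List.pyGetD parts j 0, pvStep p.2 (p.1 + PySem.List.pyGetD parts j 0))) := by
      funext q j
      simp only [pvStep]
      split <;> rfl
    rw [hbody']
    simp only [PySem.List.len_eq]
    rw [PySem.List.foldl_pyRange_pyGetD' parts 0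
      (fun (p : Int × Int × PySem.Dict Int Int) x => (p.1 + x, pvStep p.2 (p.1 + x))) (0, st) h0]
    rw [pv_inner]
    simp only [zero_add]

-- B's post-parse value is pvW with the experimental counts clamped at 0
lemma pv_altB (parts : List Int) (spectrum : List (Int × Int)) :
    ((PySem.List.pyRange 0 ((PySem.List.len parts) : Int) 1).foldl
      (fun st i =>
        ((PySem.List.pyRange i (PySem.List.len parts) 1).foldl
          (fun (q : Int × Int × PySem.Dict Int Int) j =>
            let total := q.1 + PySem.List.pyGetD parts j 0
            let v := q.2.2.getD total 0
            if v > 0 then (total, q.2.1 + 1, q.2.2.insert total (v - 1))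
            else (total, q.2.1, q.2.2))
          (0, st)).2)
      (if (PySem.Dict.mk spectrum).getD 0 0 > 0
       then (1, (PySem.Dict.mk spectrum).insert 0 ((PySem.Dict.mk spectrum).getD 0 0 - 1))
       else (0, PySem.Dict.mk spectrum))).1
    = pvW (fun k c => min c (max ((PySem.Dict.mk spectrum).getD k 0) 0)) (0 :: pvSub parts) := by
  rw [pv_bodyB parts (PySem.Dict.mk spectrum), pv_fold_step, pv_match_eq]
  simp

-- sum comparison: pointwise ≤ with one strict member gives <
lemma pv_sum_lt (l : List Int) (f h : Int → Int)
    (hle : ∀ k ∈ l, f k ≤ h k) (hlt : ∃ k ∈ l, f k < h k) :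
    (l.map f).sum < (l.map h).sum := by
  induction l with
  | nil => rcases hlt with ⟨k, hk, _⟩; cases hk
  | cons a l ih =>
    simp only [List.map_cons, List.sum_cons]
    rcases hlt with ⟨k, hk, hklt⟩
    have htail_le : (l.map f).sum ≤ (l.map h).sum := by
      apply List.sum_le_sum
      intro x hx
      exact hle x (List.mem_cons_of_mem a hx)
    rcases List.mem_cons.mp hk with rfl | hk'
    · exact add_lt_add_of_lt_of_le hklt htail_le
    · have htail_lt : (l.map f).sum < (l.map h).sum :=
        ih (fun x hx => hle x (List.mem_cons_of_mem a hx)) ⟨k, hk', hklt⟩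
      exact add_lt_add_of_le_of_lt (hle a List.mem_cons_self) htail_lt

-- ===== VERDICT (by name: the statement is the Claim_ definition above) =====
theorem linear_score_spec : Claim_unchanged_linear_score := by
  intro peptide spectrum _hdom _hpre hnd
  unfold linear_score linear_score_alt
  cases hc : PySem.Str.len peptide == 0 with
  | true => simp
  | false =>
    cases hmap : ((PySem.Str.split? peptide "-").getD []).mapM PySem.Int.ofStr? with
    | none => simp
    | some parts =>
      simp only [Bool.false_eq_true, if_false]
      rw [pv_bodyA parts spectrum, pv_altB parts spectrum]
      apply pvW_congr
      intro k hk
      have hglt : ¬ (PySem.Dict.mk spectrum).getD k 0 < 0 := by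
        intro hneg
        apply hnd
        refine (pv_D_iff peptide spectrum parts hmap).mpr
          ⟨by simpa using (beq_eq_false_iff_ne.mp hc), k, ?_, hneg⟩
        simpa using hk
      omega

theorem linear_score_changed : Claim_changed_linear_score := by
  unfold Claim_changed_linear_score; decide

theorem linear_score_tight : Claim_exact_linear_score := by
  intro peptide spectrum _hdom hpre hd
  have hlen : PySem.Str.len peptide ≠ 0 := hd.1
  have hne : peptide ≠ "" := by
    intro he
    subst he
    exact hlen (by decide)
  have hsome : ∀ p ∈ (PySem.Str.split? peptide "-").getD [], (PySem.Int.ofStr? p).isSome = true := by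
    rcases hpre with h | h
    · exact absurd h hne
    · exact h
  obtain ⟨parts, hparts⟩ : ∃ parts,
      ((PySem.Str.split? peptide "-").getD []).mapM PySem.Int.ofStr? = some parts := by
    rcases ho : ((PySem.Str.split? peptide "-").getD []).mapM PySem.Int.ofStr? with _ | parts
    · exfalso
      rcases pv_mapM_none PySem.Int.ofStr? _ ho with ⟨p, hp, hnone⟩
      have := hsome p hp
      rw [hnone] at this
      exact absurd this (by decide)
    · exact ⟨parts, rfl⟩
  obtain ⟨_, k0, hk0, hneg⟩ := (pv_D_iff peptide spectrum parts hparts).mp hd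
  have hc : (PySem.Str.len peptide == 0) = false := beq_eq_false_iff_ne.mpr hlen
  unfold linear_score linear_score_alt
  simp only [hc, Bool.false_eq_true, if_false, hparts]
  rw [pv_bodyA parts spectrum, pv_altB parts spectrum]
  apply ne_of_lt
  unfold pvW
  apply pv_sum_lt
  · intro k _
    have hcnt : (0 : Int) ≤ (((0 :: pvSub parts).count k : Nat) : Int) := by positivity
    beta_reduce
    omega
  · refine ⟨k0, (PySem.List.mem_dedup _ _).mpr hk0, ?_⟩
    have hcnt : 0 < (0 :: pvSub parts).count k0 := List.count_pos_iff.mpr hk0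
    have hcnt' : (1 : Int) ≤ (((0 :: pvSub parts).count k0 : Nat) : Int) := by exact_mod_cast hcnt
    beta_reduce
    omega
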